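-- pv_equiv track=rewrite | github.com/DocEon/Kirabot | dice.py | get_successes
-- ===== SOURCE A (Python) =====
-- def get_successes(dice, diff):
--     # A botch is going to return as an int with value -1
--     successes = False
--     numSuc = 0
--     for die in dice:
--         if die == 1:
--             numSuc -= 1
--         elif die >= diff:
--             numSuc += 1
--             successes = True
--     if numSuc < 0 and successes == False:
--         return -1
--     elif numSuc <= 0:
--         return 0
--     else:
--         return numSuc
-- ===== SOURCE B (Python) =====
-- def get_successes(dice, diff):
--     ones = sum(1 for d in dice if d == 1)
--     hits = sum(1 for d in dice if d != 1 and d >= diff)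
--     if hits == 0 and ones > 0:
--         return -1
--     if hits - ones <= 0:
--         return 0
--     return hits - ones
-- ===== Notes on version B (the rewrite author's own statement) =====
-- stated objective: simpler
-- what changed: Replaced the single interleaved loop that updates a counter and a boolean flag with two scalar aggregates (count of 1s, count of hits) followed by a closed-form classification of botch/zero/successes.
import Mathlib
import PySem

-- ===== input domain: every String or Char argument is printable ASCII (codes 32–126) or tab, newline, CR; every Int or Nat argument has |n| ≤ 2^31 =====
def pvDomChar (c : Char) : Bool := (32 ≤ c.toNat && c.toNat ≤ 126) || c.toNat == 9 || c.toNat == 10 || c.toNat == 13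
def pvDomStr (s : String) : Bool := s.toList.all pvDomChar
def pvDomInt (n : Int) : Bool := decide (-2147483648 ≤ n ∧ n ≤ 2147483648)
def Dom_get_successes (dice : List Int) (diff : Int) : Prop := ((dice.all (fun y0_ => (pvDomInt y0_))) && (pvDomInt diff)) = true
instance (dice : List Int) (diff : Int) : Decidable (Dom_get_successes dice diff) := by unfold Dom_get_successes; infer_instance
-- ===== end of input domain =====

-- B: aggregate-then-classify decomposition (count 1s and hits, then a closed-form conditional) instead of A's interleaved loop with a boolean flag; objective: simpler.
-- ===== PORT A =====
def get_successes (dice : List Int) (diff : Int) : Int :=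
  let st := dice.foldl (fun (st : Bool × Int) die =>
    if die == 1 then (st.1, st.2 - 1)
    else if die ≥ diff then (true, st.2 + 1)
    else st) (false, 0)
  if st.2 < 0 ∧ st.1 = false then -1
  else if st.2 ≤ 0 then 0
  else st.2

-- ===== PORT B =====
def get_successes_alt (dice : List Int) (diff : Int) : Int :=
  let ones : Int := (dice.countP (fun d => d == 1) : Nat)
  let hits : Int := (dice.countP (fun d => d != 1 && d ≥ diff) : Nat)
  if hits = 0 ∧ ones > 0 then -1
  else if hits - ones ≤ 0 then 0
  else hits - ones

-- ===== PRECONDITION & SPEC =====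
def Spec_get_successes (dice : List Int) (diff : Int) (out : Int) : Prop := out = get_successes_alt dice diff
instance (dice : List Int) (diff : Int) (out : Int) : Decidable (Spec_get_successes dice diff out) := by unfold Spec_get_successes; infer_instance

-- ===== CLAIM (what is proved, stated in full; the proofs are below) =====
def Claim_equal_get_successes : Prop := ∀ (dice : List Int) (diff : Int), Dom_get_successes dice diff → Spec_get_successes dice diff (get_successes dice diff)

-- ===== LEMMAS AND PROOFS =====

-- ===== VERDICT (by name: the statement is the Claim_ definition above) =====
lemma gs_fold_inv (diff : Int) (dice : List Int) (b : Bool) (n : Int) :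
    dice.foldl (fun (st : Bool × Int) die =>
      if die == 1 then (st.1, st.2 - 1)
      else if die ≥ diff then (true, st.2 + 1)
      else st) (b, n)
    = (b || decide (0 < dice.countP (fun d => d != 1 && d ≥ diff)),
       n + (dice.countP (fun d => d != 1 && d ≥ diff) : Int)
         - (dice.countP (fun d => d == 1) : Int)) := by
  induction dice generalizing b n with
  | nil => simp
  | cons d tl ih =>
    simp only [List.foldl_cons, List.countP_cons]
    by_cases h1 : d = 1
    · subst h1
      have e2 : ((1:Int) != 1 && decide ((1:Int) ≥ diff)) = false := by simp
      rw [e2]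
      simp only [BEq.rfl, ih]
      refine Prod.ext rfl ?_
      push_cast
      ring
    · have e1 : (d == 1) = false := by simp [h1]
      rw [e1]
      by_cases h2 : d ≥ diff
      · have e2 : (d != 1 && decide (d ≥ diff)) = true := by simp [h1, h2]
        rw [e2]
        simp only [Bool.false_eq_true, if_false, if_pos h2, ih]
        refine Prod.ext ?_ ?_
        · simp
        · push_cast
          ring
      · have e2 : (d != 1 && decide (d ≥ diff)) = false := by simp [h2]
        rw [e2]
        simp only [Bool.false_eq_true, if_false, if_neg h2, ih]
        refine Prod.ext rfl ?_
        push_cast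
        ring

theorem get_successes_spec : Claim_equal_get_successes := by
  intro dice diff _
  unfold Spec_get_successes get_successes get_successes_alt
  simp only [gs_fold_inv, Bool.false_or]
  set H := dice.countP (fun d => d != 1 && d ≥ diff) with hH
  set O := dice.countP (fun d => d == 1) with hO
  clear_value H O
  split_ifs <;>
    simp only [decide_eq_false_iff_not, not_lt, Nat.le_zero,
      not_and, Nat.cast_pos, not_le] at * <;>
    omega
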